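-- pv_equiv track=rewrite | github.com/WuPedin/LeetCodePractice | LintCode/DFS/132_Word Search II_DFS.py | get_prefix_set
-- ===== SOURCE A (Python) =====
-- def get_prefix_set(words):
--     """
--     key放前綴詞，value放是否為word
--     """
--     prefix_is_word = {}
--     for word in words:
--         prefix_is_word[word] = True
--         for i in range(len(word)):
--             prefix = word[:i + 1]
--             if prefix not in prefix_is_word:
--                 prefix_is_word[prefix] = False
--     return prefix_is_word
-- ===== SOURCE B (Python) =====
-- def _lcp_len(a, b):
--     n = min(len(a), len(b))
--     i = 0
--     while i < n and a[i] == b[i]: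
--         i += 1
--     return i
--
--
-- def get_prefix_set(words):
--     """
--     key: prefix word, value: whether it is a full word.
--
--     The prefixes already recorded for a word are exactly its prefixes up to the
--     longest common prefix with any earlier word, so record the word itself and
--     then only the tail range of strictly new proper prefixes -- no per-prefix
--     membership tests at all.
--     """
--     prefix_is_word = {}
--     seen = []
--     for word in words:
--         longest = 0
--         for w in seen:
--             longest = max(longest, _lcp_len(word, w))
--         prefix_is_word[word] = True
--         for j in range(longest + 1, len(word)):
--             prefix_is_word[word[:j]] = False
--         seen.append(word)
--     return prefix_is_word
-- ===== Notes on version B (the rewrite author's own statement) =====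
-- stated objective: alternative
-- what changed: B keeps no prefix dictionary membership tests: for each word it computes the longest common prefix with the already-processed words and then records the word plus only the contiguous tail range of strictly new proper prefixes, where A enumerates every prefix of every word and probes the dict for each.
import Mathlib
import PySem

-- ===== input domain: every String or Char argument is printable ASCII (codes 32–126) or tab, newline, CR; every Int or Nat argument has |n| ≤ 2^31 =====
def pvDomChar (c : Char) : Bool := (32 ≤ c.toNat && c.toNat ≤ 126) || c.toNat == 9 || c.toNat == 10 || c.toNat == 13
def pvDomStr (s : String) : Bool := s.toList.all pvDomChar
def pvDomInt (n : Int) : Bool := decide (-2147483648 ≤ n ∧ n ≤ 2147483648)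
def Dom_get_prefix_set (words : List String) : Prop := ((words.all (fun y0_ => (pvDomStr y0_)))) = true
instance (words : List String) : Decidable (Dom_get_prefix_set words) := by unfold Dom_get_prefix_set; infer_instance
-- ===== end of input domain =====

-- B replaces A's probe-every-prefix dict loop by a longest-common-prefix scan over the
-- already-processed words, inserting only the contiguous range of strictly new prefixes
-- (alternative algorithm, same result including key order).


-- ===== PORT A =====
def get_prefix_set (words : List String) : List (String × Bool) :=
  (words.foldl
    (fun prefix_is_word word =>
      (PySem.List.pyRange 0 (PySem.Str.len word) 1).foldl
        (fun prefix_is_word i =>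
          let pfx := PySem.Str.slice word none (some (i + 1))
          if prefix_is_word.contains pfx then prefix_is_word
          else prefix_is_word.insert pfx false)
        (prefix_is_word.insert word true))
    PySem.Dict.empty).items

-- ===== PORT B =====
-- while-loop of _lcp_len, counting matching leading characters
def lcpAux : List Char → List Char → Nat
  | a :: as, b :: bs => if a = b then lcpAux as bs + 1 else 0
  | _, _ => 0

def lcpLen (a b : String) : Int := (lcpAux a.toList b.toList : Int)

def get_prefix_set_alt (words : List String) : List (String × Bool) :=
  (words.foldl
    (fun (st : PySem.Dict String Bool × List String) word =>
      let longest := st.2.foldl (fun L w => max L (lcpLen word w)) 0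
      let d := st.1.insert word true
      let d := (PySem.List.pyRange (longest + 1) (PySem.Str.len word) 1).foldl
        (fun d j => d.insert (PySem.Str.slice word none (some j)) false) d
      (d, st.2 ++ [word]))
    (PySem.Dict.empty, [])).1.items

-- ===== PRECONDITION & SPEC =====
def Spec_get_prefix_set (words : List String) (out : List (String × Bool)) : Prop := out = get_prefix_set_alt words
instance (words : List String) (out : List (String × Bool)) : Decidable (Spec_get_prefix_set words out) := by unfold Spec_get_prefix_set; infer_instance

-- ===== CLAIM (what is proved, stated in full; the proofs are below) =====
def Claim_equal_get_prefix_set : Prop := ∀ (words : List String), Dom_get_prefix_set words → Spec_get_prefix_set words (get_prefix_set words)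

-- ===== LEMMAS AND PROOFS =====

-- proof-side names for the pieces of the two loops
def pvPfx (word : String) (j : Int) : String := PySem.Str.slice word none (some j)

def pvStepA (d : PySem.Dict String Bool) (word : String) : PySem.Dict String Bool :=
  (PySem.List.pyRange 0 (PySem.Str.len word) 1).foldl
    (fun d i =>
      if d.contains (pvPfx word (i + 1)) then d else d.insert (pvPfx word (i + 1)) false)
    (d.insert word true)

def pvL (prev : List String) (word : String) : Int :=
  prev.foldl (fun L w => max L (lcpLen word w)) 0

def pvStepB (st : PySem.Dict String Bool × List String) (word : String) :
    PySem.Dict String Bool × List String :=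
  ((PySem.List.pyRange (pvL st.2 word + 1) (PySem.Str.len word) 1).foldl
      (fun d j => d.insert (pvPfx word j) false) (st.1.insert word true),
   st.2 ++ [word])

-- invariant: the recorded keys are exactly the earlier words and their nonempty prefixes
def pvInv (prev : List String) (d : PySem.Dict String Bool) : Prop :=
  ∀ p : String, d.contains p = true ↔
    ∃ w ∈ prev, p = w ∨ (1 ≤ p.toList.length ∧ p.toList <+: w.toList)

theorem pvPfx_toList (word : String) (j : Int) (hj : 0 ≤ j) :
    (pvPfx word j).toList = word.toList.take j.toNat := by
  simp [pvPfx]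
  exact PySem.List.slice_to word.toList hj

theorem pvPfx_full (word : String) :
    pvPfx word (word.toList.length : Int) = word := by
  apply String.toList_inj.mp
  rw [pvPfx_toList word _ (Int.natCast_nonneg _)]
  simp

theorem lcpAux_le_left (a b : List Char) : lcpAux a b ≤ a.length := by
  induction a generalizing b with
  | nil => cases b <;> exact Nat.le_refl 0
  | cons x as ih =>
    cases b with
    | nil => exact Nat.zero_le _
    | cons y bs =>
      by_cases h : x = y
      · simp only [lcpAux, if_pos h, List.length_cons]
        exact Nat.succ_le_succ (ih bs)
      · simp [lcpAux, h]

theorem take_prefix_iff (j : Nat) (a b : List Char) (hj : j ≤ a.length) :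
    a.take j <+: b ↔ j ≤ lcpAux a b := by
  induction j generalizing a b with
  | zero => simp
  | succ j ih =>
    cases a with
    | nil => simp at hj
    | cons x as =>
      cases b with
      | nil =>
        simp [lcpAux]
      | cons y bs =>
        simp only [List.take_succ_cons, List.cons_prefix_cons, lcpAux]
        by_cases h : x = y
        · rw [if_pos h, ih as bs (by simpa using hj)]
          simp only [h, true_and]
          omega
        · simp [h]

theorem le_pvL_iff (prev : List String) (word : String) (init j : Int) :
    j ≤ prev.foldl (fun L w => max L (lcpLen word w)) init ↔
      j ≤ init ∨ ∃ w ∈ prev, j ≤ lcpLen word w := by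
  induction prev generalizing init with
  | nil => simp
  | cons x xs ih =>
    rw [List.foldl_cons, ih]
    constructor
    · rintro (h | ⟨w, hw, hj⟩)
      · rcases le_max_iff.mp h with h | h
        · exact Or.inl h
        · exact Or.inr ⟨x, List.mem_cons_self, h⟩
      · exact Or.inr ⟨w, List.mem_cons_of_mem _ hw, hj⟩
    · rintro (h | ⟨w, hw, hj⟩)
      · exact Or.inl (le_max_iff.mpr (Or.inl h))
      · rcases List.mem_cons.mp hw with rfl | hw
        · exact Or.inl (le_max_iff.mpr (Or.inr hj))
        · exact Or.inr ⟨w, hw, hj⟩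

theorem pvL_nonneg (prev : List String) (word : String) : 0 ≤ pvL prev word :=
  (le_pvL_iff prev word 0 0).mpr (Or.inl le_rfl)

theorem pvL_le_len (prev : List String) (word : String) :
    pvL prev word ≤ (word.toList.length : Int) := by
  rcases (le_pvL_iff prev word 0 (pvL prev word)).mp le_rfl with h | ⟨w, _, hj⟩
  · omega
  · have := lcpAux_le_left word.toList w.toList
    unfold lcpLen at hj
    omega

-- the conditional-insert loop skips over keys that are all present
theorem foldl_condInsert_skip (key : Int → String) (l : List Int) (d : PySem.Dict String Bool)
    (h : ∀ i ∈ l, d.contains (key i) = true) :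
    l.foldl (fun d i => if d.contains (key i) then d else d.insert (key i) false) d = d := by
  induction l with
  | nil => rfl
  | cons x xs ih =>
    rw [List.foldl_cons, if_pos (h x (List.mem_cons_self))]
    exact ih (fun i hi => h i (List.mem_cons_of_mem _ hi))

-- over fresh distinct keys the conditional insert is a plain insert
theorem foldl_condInsert_fresh (key : Int → String) (l : List Int) :
    ∀ d : PySem.Dict String Bool,
    (∀ i ∈ l, d.contains (key i) = false) → ((l.map key).Nodup) →
    l.foldl (fun d i => if d.contains (key i) then d else d.insert (key i) false) d
      = l.foldl (fun d i => d.insert (key i) false) d := by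
  induction l with
  | nil => intro d _ _; rfl
  | cons x xs ih =>
    intro d hfresh hnd
    simp only [List.map_cons, List.nodup_cons, List.mem_map] at hnd
    rw [List.foldl_cons, List.foldl_cons,
        if_neg (by simp [hfresh x (List.mem_cons_self)])]
    refine ih (d.insert (key x) false) (fun i hi => ?_) hnd.2
    rw [PySem.Dict.contains_insert]
    have h1 : key i ≠ key x := fun he => hnd.1 ⟨i, hi, he⟩
    simp [h1, hfresh i (List.mem_cons_of_mem _ hi)]

theorem contains_foldl_insert (key : Int → String) (l : List Int) :
    ∀ (d : PySem.Dict String Bool) (p : String),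
    ((l.foldl (fun d i => d.insert (key i) false) d).contains p = true ↔
      (∃ i ∈ l, p = key i) ∨ d.contains p = true) := by
  induction l with
  | nil => intro d p; simp
  | cons x xs ih =>
    intro d p
    rw [List.foldl_cons, ih]
    constructor
    · rintro (⟨i, hi, rfl⟩ | h)
      · exact Or.inl ⟨i, List.mem_cons_of_mem _ hi, rfl⟩
      · simp only [PySem.Dict.contains_insert, Bool.or_eq_true, beq_iff_eq] at h
        rcases h with h | h
        · exact Or.inl ⟨x, List.mem_cons_self, h⟩
        · exact Or.inr h
    · rintro (⟨i, hi, rfl⟩ | h)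
      · rcases List.mem_cons.mp hi with rfl | hi
        · exact Or.inr (by rw [PySem.Dict.contains_insert]; simp)
        · exact Or.inl ⟨i, hi, rfl⟩
      · exact Or.inr (by rw [PySem.Dict.contains_insert]; simp [h])

-- reindexing: a fold that uses i+1 over [a,b) is a fold over [a+1,b+1)
theorem foldl_pyRange_shift {β : Type} (a b : Int) (f : β → Int → β) (init : β) :
    (PySem.List.pyRange a b 1).foldl (fun d i => f d (i + 1)) init
      = (PySem.List.pyRange (a + 1) (b + 1) 1).foldl f init := by
  rw [PySem.List.pyRange_one a b, PySem.List.pyRange_one (a + 1) (b + 1)]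
  have h : b + 1 - (a + 1) = b - a := by ring
  rw [h, List.foldl_map, List.foldl_map]
  have hf : (fun (d : β) (k : Nat) => f d (a + (k : Int) + 1))
      = (fun (d : β) (k : Nat) => f d (a + 1 + (k : Int))) := by
    funext d k
    congr 1
    ring
  rw [hf]

-- a nonempty prefix of the current word is recorded iff its length is at most pvL
theorem contains_pfx_iff (prev : List String) (d : PySem.Dict String Bool) (word : String)
    (hInv : pvInv prev d) (j : Int) (h1 : 1 ≤ j) (h2 : j ≤ (word.toList.length : Int)) :
    (d.contains (pvPfx word j) = true ↔ j ≤ pvL prev word) := by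
  have htl : (pvPfx word j).toList = word.toList.take j.toNat := pvPfx_toList word j (by omega)
  have hlen : (pvPfx word j).toList.length = j.toNat := by
    rw [htl, List.length_take]
    omega
  rw [hInv]
  constructor
  · rintro ⟨w, hw, hc⟩
    have hpre : (pvPfx word j).toList <+: w.toList := by
      rcases hc with rfl | ⟨_, hp⟩
      · exact List.prefix_refl _
      · exact hp
    rw [htl] at hpre
    have := (take_prefix_iff j.toNat word.toList w.toList (by omega)).mp hpre
    refine (le_pvL_iff prev word 0 j).mpr (Or.inr ⟨w, hw, ?_⟩)
    unfold lcpLen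
    omega
  · intro hL
    rcases (le_pvL_iff prev word 0 j).mp hL with h | ⟨w, hw, hj⟩
    · omega
    · unfold lcpLen at hj
      have hpre := (take_prefix_iff j.toNat word.toList w.toList (by omega)).mpr (by omega)
      exact ⟨w, hw, Or.inr ⟨by omega, by rw [htl]; exact hpre⟩⟩

-- A's per-word loop normalizes to B's: skip the first pvL prefixes, then insert the
-- fresh range, and skip the full word which was inserted up front
theorem stepA_eq (prev : List String) (d : PySem.Dict String Bool) (word : String)
    (hInv : pvInv prev d) :
    pvStepA d word
      = (PySem.List.pyRange (pvL prev word + 1) (PySem.Str.len word) 1).foldl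
          (fun d j => d.insert (pvPfx word j) false) (d.insert word true) := by
  have hL0 : 0 ≤ pvL prev word := pvL_nonneg prev word
  have hLn : pvL prev word ≤ (word.toList.length : Int) := pvL_le_len prev word
  have hlen : PySem.Str.len word = (word.toList.length : Int) := by
    simp [PySem.Str.len_eq]
  rw [hlen]
  set n : Int := (word.toList.length : Int) with hn
  set L : Int := pvL prev word with hLdef
  unfold pvStepA
  rw [hlen, PySem.List.pyRange_one_append 0 L n hL0 hLn, List.foldl_append]
  rw [foldl_condInsert_skip (fun i => pvPfx word (i + 1)) (PySem.List.pyRange 0 L 1)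
    (d.insert word true) (fun i hi => by
      rw [PySem.List.mem_pyRange_one] at hi
      rw [PySem.Dict.contains_insert, Bool.or_eq_true]
      exact Or.inr ((contains_pfx_iff prev d word hInv (i + 1) (by omega)
        (by omega)).mpr (by omega)))]
  rcases eq_or_lt_of_le hLn with hEq | hLt
  · rw [show PySem.List.pyRange L n 1 = [] from PySem.List.pyRange_one_eq_nil (by omega),
        show PySem.List.pyRange (L + 1) n 1 = [] from PySem.List.pyRange_one_eq_nil (by omega)]
    rfl
  · have hsplit : PySem.List.pyRange L n 1 = PySem.List.pyRange L (n - 1) 1 ++ [n - 1] := by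
      have h := PySem.List.pyRange_one_succ_right (a := L) (b := n - 1) (by omega)
      have h2 : n - 1 + 1 = n := by ring
      rw [h2] at h
      exact h
    rw [hsplit, List.foldl_append]
    have hfresh : ∀ i ∈ PySem.List.pyRange L (n - 1) 1,
        (d.insert word true).contains (pvPfx word (i + 1)) = false := by
      intro i hi
      rw [PySem.List.mem_pyRange_one] at hi
      rw [PySem.Dict.contains_insert]
      have hne : pvPfx word (i + 1) ≠ word := by
        intro he
        have := congrArg (fun s => s.toList.length) he
        simp only [pvPfx_toList word (i + 1) (by omega), List.length_take] at this
        omega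
      have hnc : d.contains (pvPfx word (i + 1)) = false := by
        rw [Bool.eq_false_iff]
        intro hc
        have := (contains_pfx_iff prev d word hInv (i + 1) (by omega) (by omega)).mp hc
        omega
      simp [hne, hnc]
    have hnd : ((PySem.List.pyRange L (n - 1) 1).map (fun i => pvPfx word (i + 1))).Nodup := by
      refine (PySem.List.nodup_pyRange_one L (n - 1)).map_on ?_
      intro i hi i' hi' he
      rw [PySem.List.mem_pyRange_one] at hi hi'
      have := congrArg (fun s => s.toList.length) he
      simp only [pvPfx_toList word (i + 1) (by omega), pvPfx_toList word (i' + 1) (by omega),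
        List.length_take] at this
      omega
    rw [foldl_condInsert_fresh (fun i => pvPfx word (i + 1)) _ _ hfresh hnd]
    rw [foldl_pyRange_shift L (n - 1) (fun d j => (d : PySem.Dict String Bool).insert (pvPfx word j) false)]
    have h2 : n - 1 + 1 = n := by ring
    rw [h2]
    rw [List.foldl_cons, List.foldl_nil]
    have hword : pvPfx word (n - 1 + 1) = word := by
      rw [h2, hn]
      exact pvPfx_full word
    rw [hword]
    split_ifs with hc
    · rfl
    · exact absurd ((contains_foldl_insert _ _ _ _).mpr
        (Or.inr (by rw [PySem.Dict.contains_insert]; simp))) hc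

-- the invariant is preserved by the normalized per-word step
theorem inv_step (prev : List String) (d : PySem.Dict String Bool) (word : String)
    (hInv : pvInv prev d) :
    pvInv (prev ++ [word])
      ((PySem.List.pyRange (pvL prev word + 1) (PySem.Str.len word) 1).foldl
        (fun d j => d.insert (pvPfx word j) false) (d.insert word true)) := by
  have hlen : PySem.Str.len word = (word.toList.length : Int) := by
    simp [PySem.Str.len_eq]
  rw [hlen]
  intro p
  set n : Int := (word.toList.length : Int) with hn
  set L : Int := pvL prev word with hLdef
  rw [contains_foldl_insert]
  constructor
  · rintro (⟨j, hj, rfl⟩ | h)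
    · rw [PySem.List.mem_pyRange_one] at hj
      have hL0 : 0 ≤ L := pvL_nonneg prev word
      refine ⟨word, by simp, Or.inr ⟨?_, ?_⟩⟩
      · rw [pvPfx_toList word j (by omega), List.length_take]
        omega
      · rw [pvPfx_toList word j (by omega)]
        exact List.take_prefix _ _
    · simp only [PySem.Dict.contains_insert, Bool.or_eq_true, beq_iff_eq] at h
      rcases h with h | h
      · exact ⟨word, by simp, Or.inl h⟩
      · obtain ⟨w, hw, hc⟩ := hInv p |>.mp h
        exact ⟨w, List.mem_append_left _ hw, hc⟩
  · rintro ⟨w, hw, hc⟩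
    rcases List.mem_append.mp hw with hw | hw
    · refine Or.inr ?_
      rw [PySem.Dict.contains_insert, Bool.or_eq_true]
      exact Or.inr ((hInv p).mpr ⟨w, hw, hc⟩)
    · have hww : w = word := by simpa using hw
      subst hww
      rcases hc with rfl | ⟨hp1, hp2⟩
      · exact Or.inr (by rw [PySem.Dict.contains_insert]; simp)
      · have hptake : p.toList = w.toList.take p.toList.length :=
          List.prefix_iff_eq_take.mp hp2
        have hjn : p.toList.length ≤ w.toList.length := hp2.length_le
        set j : Nat := p.toList.length with hj
        by_cases hcase1 : (j : Int) ≤ L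
        · refine Or.inr ?_
          rw [PySem.Dict.contains_insert, Bool.or_eq_true]
          refine Or.inr ?_
          have : d.contains (pvPfx w (j : Int)) = true :=
            (contains_pfx_iff prev d w hInv (j : Int) (by omega) (by omega)).mpr hcase1
          have hpp : pvPfx w (j : Int) = p := by
            apply String.toList_inj.mp
            rw [pvPfx_toList w (j : Int) (by omega)]
            simp [← hptake]
          rwa [hpp] at this
        · by_cases hcase2 : j = w.toList.length
          · refine Or.inr ?_
            have : p = w := by
              apply String.toList_inj.mp
              rw [hptake, hcase2]
              simp
            rw [PySem.Dict.contains_insert, this]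
            simp
          · refine Or.inl ⟨(j : Int), ?_, ?_⟩
            · rw [PySem.List.mem_pyRange_one]
              omega
            · apply String.toList_inj.mp
              rw [pvPfx_toList w (j : Int) (by omega)]
              simp [← hptake]

theorem loop_eq (ws : List String) :
    ∀ (d : PySem.Dict String Bool) (prev : List String), pvInv prev d →
      ws.foldl pvStepA d = (ws.foldl pvStepB (d, prev)).1
        ∧ pvInv (prev ++ ws) (ws.foldl pvStepA d) := by
  induction ws with
  | nil =>
    intro d prev h
    exact ⟨rfl, by simpa using h⟩
  | cons w ws ih =>
    intro d prev h
    have hstep := stepA_eq prev d w h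
    have hinv : pvInv (prev ++ [w]) (pvStepA d w) := by
      rw [hstep]
      exact inv_step prev d w h
    have hB : pvStepB (d, prev) w = (pvStepA d w, prev ++ [w]) := by
      unfold pvStepB
      rw [← hstep]
    rw [List.foldl_cons, List.foldl_cons, hB]
    have h2 := ih (pvStepA d w) (prev ++ [w]) hinv
    exact ⟨h2.1, by rw [List.append_cons]; exact h2.2⟩

-- ===== VERDICT (by name: the statement is the Claim_ definition above) =====
theorem get_prefix_set_spec : Claim_equal_get_prefix_set := by
  intro words _
  show get_prefix_set words = get_prefix_set_alt words
  have h0 : pvInv [] PySem.Dict.empty := by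
    intro p
    simp [PySem.Dict.contains_empty]
  have h := (loop_eq words PySem.Dict.empty [] h0).1
  show (words.foldl pvStepA PySem.Dict.empty).items
      = ((words.foldl pvStepB (PySem.Dict.empty, [])).1).items
  rw [h]
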